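-- pv_equiv track=rewrite | github.com/kyrylomykhaltsov-knu/Labs_2025_Math_2_1 | Labs/L08/t01.py | gen_vyznachnyk
-- ===== SOURCE A (Python) =====
-- def gen_vyznachnyk(n):
--     """Генерує визначники порядку k від 1 до n через рекурентне співвідношення."""
--     # Рекурентна формула: D_k = 5*D_{k-1} - 6*D_{k-2}
--     # Базові значення:
--     # D_0 вважаємо рівним 1 (одиниця для рекуренції)
--     # D_1 = |5| = 5
--     d_minus_2 = 1  # Це D_0
--     d_minus_1 = 5  # Це D_1
--
--     yield d_minus_1  # Повертаємо D_1
--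
--     if n >= 2:
--         for k in range(2, n + 1):
--             # Обчислюємо поточний визначник
--             d_potochnyi = 5 * d_minus_1 - 6 * d_minus_2
--             yield d_potochnyi
--             # Оновлюємо значення для наступного кроку
--             d_minus_2, d_minus_1 = d_minus_1, d_potochnyi
-- ===== SOURCE B (Python) =====
-- def gen_vyznachnyk(n):
--     """Generates determinants D_k for k from 1 to n via the closed form D_k = 3^(k+1) - 2^(k+1)."""
--     yield 5  # D_1 = 3^2 - 2^2
--     for k in range(2, n + 1):
--         yield 3 ** (k + 1) - 2 ** (k + 1)
-- ===== Notes on version B (the rewrite author's own statement) =====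
-- stated objective: simpler
-- what changed: Replaces the rolling 5*D(k-1)-6*D(k-2) recurrence state with the closed form D_k = 3^(k+1) - 2^(k+1) computed independently per term.
import Mathlib
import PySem

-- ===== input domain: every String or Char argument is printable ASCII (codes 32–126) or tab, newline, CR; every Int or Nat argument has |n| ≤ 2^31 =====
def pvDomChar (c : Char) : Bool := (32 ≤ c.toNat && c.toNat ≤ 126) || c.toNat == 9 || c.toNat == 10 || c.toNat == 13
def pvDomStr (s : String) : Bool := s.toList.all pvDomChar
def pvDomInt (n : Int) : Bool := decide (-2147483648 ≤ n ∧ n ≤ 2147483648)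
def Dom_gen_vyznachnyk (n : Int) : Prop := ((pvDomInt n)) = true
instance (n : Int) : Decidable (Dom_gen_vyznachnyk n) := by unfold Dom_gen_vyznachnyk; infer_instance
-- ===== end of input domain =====

-- B replaces A's rolling 5*D(k-1)-6*D(k-2) recurrence by the closed form D_k = 3^(k+1) - 2^(k+1) (simpler).

-- ===== PORT A =====
-- Generator ported as the list of yielded values: yield 5 first, then the loop
-- accumulates each yielded d_potochnyi while rolling the (d_minus_2, d_minus_1) pair.
def gen_vyznachnyk (n : Int) : List Int :=
  let acc0 : List Int := [5]
  if n ≥ 2 then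
    ((PySem.List.pyRange 2 (n + 1) 1).foldl
      (fun (st : Int × Int × List Int) _k =>
        let d2 := st.1
        let d1 := st.2.1
        let d := 5 * d1 - 6 * d2
        (d1, d, st.2.2 ++ [d]))
      (1, 5, acc0)).2.2
  else acc0

-- ===== PORT B =====
def gen_vyznachnyk_alt (n : Int) : List Int :=
  5 :: (PySem.List.pyRange 2 (n + 1) 1).map
    (fun k => 3 ^ ((k + 1).toNat) - 2 ^ ((k + 1).toNat))

-- ===== PRECONDITION & SPEC =====
def Spec_gen_vyznachnyk (n : Int) (out : List Int) : Prop := out = gen_vyznachnyk_alt n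
instance (n : Int) (out : List Int) : Decidable (Spec_gen_vyznachnyk n out) := by unfold Spec_gen_vyznachnyk; infer_instance

-- ===== CLAIM (what is proved, stated in full; the proofs are below) =====
def Claim_equal_gen_vyznachnyk : Prop := ∀ (n : Int), Dom_gen_vyznachnyk n → Spec_gen_vyznachnyk n (gen_vyznachnyk n)

-- ===== LEMMAS AND PROOFS =====

-- closed-form term: D_j = 3^(j+1) - 2^(j+1)
def pvD (j : Int) : Int := 3 ^ ((j + 1).toNat) - 2 ^ ((j + 1).toNat)

def pvStep : (Int × Int × List Int) → Int → (Int × Int × List Int) :=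
  fun st _k =>
    let d2 := st.1
    let d1 := st.2.1
    let d := 5 * d1 - 6 * d2
    (d1, d, st.2.2 ++ [d])

theorem pvD_rec (a : Int) (ha : 1 ≤ a) : 5 * pvD (a - 1) - 6 * pvD (a - 2) = pvD a := by
  unfold pvD
  have h1 : (a - 1 + 1).toNat = (a - 1).toNat + 1 := by omega
  have h2 : (a + 1).toNat = (a - 1).toNat + 2 := by omega
  have h3 : (a - 2 + 1).toNat = (a - 1).toNat := by omega
  rw [h1, h2, h3]
  generalize (a - 1).toNat = t
  rw [pow_succ, pow_succ, pow_succ, pow_succ]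
  ring

theorem pvLoop (m : Nat) : ∀ (a : Int) (acc : List Int), 1 ≤ a →
    (PySem.List.pyRange a (a + m) 1).foldl pvStep (pvD (a - 2), pvD (a - 1), acc)
      = (pvD (a + m - 2), pvD (a + m - 1),
         acc ++ (PySem.List.pyRange a (a + m) 1).map pvD) := by
  induction m with
  | zero =>
    intro a acc _
    simp
  | succ m ih =>
    intro a acc ha
    have hlt : a < a + (m + 1 : Nat) := by push_cast; omega
    rw [PySem.List.pyRange_one_cons hlt]
    simp only [List.foldl_cons, List.map_cons]
    have hstep : pvStep (pvD (a - 2), pvD (a - 1), acc) a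
        = (pvD (a + 1 - 2), pvD (a + 1 - 1), acc ++ [pvD a]) := by
      simp only [pvStep]
      rw [pvD_rec a ha, show (a + 1 - 2 : Int) = a - 1 from by ring,
          show (a + 1 - 1 : Int) = a from by ring]
    rw [hstep]
    have hb : a + ((m : Int) + 1) = (a + 1) + m := by ring
    push_cast
    rw [hb, ih (a + 1) (acc ++ [pvD a]) (by omega)]
    rw [show ((a + 1) + (m : Int) - 2 : Int) = a + ((m : Int) + 1) - 2 from by ring,
        show ((a + 1) + (m : Int) - 1 : Int) = a + ((m : Int) + 1) - 1 from by ring,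
        hb]
    simp

-- ===== VERDICT (by name: the statement is the Claim_ definition above) =====
theorem gen_vyznachnyk_spec : Claim_equal_gen_vyznachnyk := by
  intro n _
  unfold Spec_gen_vyznachnyk gen_vyznachnyk gen_vyznachnyk_alt
  by_cases h : n ≥ 2
  · simp only [h, if_pos]
    have hm : n + 1 = 2 + ((n - 1).toNat : Int) := by omega
    have key := pvLoop (n - 1).toNat 2 [5] (by omega)
    have h0 : pvD (0 : Int) = 1 := by decide
    have h1 : pvD (1 : Int) = 5 := by decide
    rw [show (2 - 2 : Int) = 0 from by norm_num, show (2 - 1 : Int) = 1 from by norm_num,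
        h0, h1] at key
    rw [hm]
    show ((PySem.List.pyRange 2 (2 + ((n - 1).toNat : Int)) 1).foldl pvStep (1, 5, [5])).2.2
        = 5 :: (PySem.List.pyRange 2 (2 + ((n - 1).toNat : Int)) 1).map
            (fun k => 3 ^ ((k + 1).toNat) - 2 ^ ((k + 1).toNat))
    rw [key]
    simp [pvD]
  · have hr : PySem.List.pyRange 2 (n + 1) 1 = [] := by
      rw [PySem.List.pyRange_one]
      have : (n + 1 - 2).toNat = 0 := by omega
      simp [this]
    simp [h, hr]
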